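-- pv_equiv track=rewrite | github.com/wwweibu/Lrobot | lrobot/logic/command/test.py | fence_cipher_4
-- ===== SOURCE A (Python) =====
-- def fence_cipher_4(plain_text):
--     plain_text = "".join(plain_text.split())
--
--     # 创建四个列表
--     list1 = []  # 余1
--     list2 = []  # 余2
--     list3 = []  # 余3
--     list4 = []  # 整除4
--
--     for i, char in enumerate(plain_text):
--         if i % 4 == 0:
--             list1.append(char)  # 余1
--         elif i % 4 == 1:
--             list2.append(char)  # 余2
--         elif i % 4 == 2:
--             list3.append(char)  # 余3
--         else:
--             list4.append(char)  # 整除4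
--
--     # 合并结果
--     result = "".join(list1 + list2 + list3 + list4)
--     return result
-- ===== SOURCE B (Python) =====
-- def fence_cipher_4(plain_text):
--     text = "".join(plain_text.split())
--     return text[0::4] + text[1::4] + text[2::4] + text[3::4]
-- ===== Notes on version B (the rewrite author's own statement) =====
-- stated objective: simpler
-- what changed: Replaces the enumerate loop that dispatches each character into one of four bucket lists by index mod 4 with a direct concatenation of the four strided slices text[r::4].
import Mathlib
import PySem

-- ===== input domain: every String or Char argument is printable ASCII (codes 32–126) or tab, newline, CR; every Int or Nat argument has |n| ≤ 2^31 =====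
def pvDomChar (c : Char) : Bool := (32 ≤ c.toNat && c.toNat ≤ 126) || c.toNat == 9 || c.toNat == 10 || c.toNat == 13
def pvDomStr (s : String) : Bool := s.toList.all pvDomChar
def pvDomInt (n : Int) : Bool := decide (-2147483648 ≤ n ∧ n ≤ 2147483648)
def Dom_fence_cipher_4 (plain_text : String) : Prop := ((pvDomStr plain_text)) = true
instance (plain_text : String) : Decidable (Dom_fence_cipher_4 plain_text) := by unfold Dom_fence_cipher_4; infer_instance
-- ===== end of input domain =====

-- B concatenates the four strided slices text[r::4] instead of A's single enumerate
-- loop dispatching characters into four bucket lists by index mod 4 (objective: simpler).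

-- ===== PORT A =====
-- the loop body: dispatch (i, char) into one of the four bucket lists by i % 4
def fenceStep (st : List Char × List Char × List Char × List Char) (p : Int × Char) :
    List Char × List Char × List Char × List Char :=
  match st, p with
  | (l1, l2, l3, l4), (i, c) =>
    if PySem.Int.mod i 4 = 0 then (l1 ++ [c], l2, l3, l4)
    else if PySem.Int.mod i 4 = 1 then (l1, l2 ++ [c], l3, l4)
    else if PySem.Int.mod i 4 = 2 then (l1, l2, l3 ++ [c], l4)
    else (l1, l2, l3, l4 ++ [c])

def fence_cipher_4 (plain_text : String) : String :=
  -- plain_text = "".join(plain_text.split())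
  let text := PySem.Chars.join [] (PySem.Chars.split₀ plain_text.toList)
  -- for i, char in enumerate(plain_text): append into list1..list4 by i % 4
  let r := (PySem.List.enumerate text 0).foldl fenceStep ([], [], [], [])
  -- result = "".join(list1 + list2 + list3 + list4)
  String.ofList (r.1 ++ r.2.1 ++ r.2.2.1 ++ r.2.2.2)

-- ===== PORT B =====
def fence_cipher_4_alt (plain_text : String) : String :=
  -- text = "".join(plain_text.split())
  let text := PySem.Chars.join [] (PySem.Chars.split₀ plain_text.toList)
  -- text[0::4] + text[1::4] + text[2::4] + text[3::4]
  String.ofList (((PySem.List.slice? text (some 0) none 4).getD []) ++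
                 ((PySem.List.slice? text (some 1) none 4).getD []) ++
                 ((PySem.List.slice? text (some 2) none 4).getD []) ++
                 ((PySem.List.slice? text (some 3) none 4).getD []))

-- ===== PRECONDITION & SPEC =====
def Spec_fence_cipher_4 (plain_text : String) (out : String) : Prop := out = fence_cipher_4_alt plain_text
instance (plain_text : String) (out : String) : Decidable (Spec_fence_cipher_4 plain_text out) := by unfold Spec_fence_cipher_4; infer_instance

-- ===== CLAIM (what is proved, stated in full; the proofs are below) =====
def Claim_equal_fence_cipher_4 : Prop := ∀ (plain_text : String), Dom_fence_cipher_4 plain_text → Spec_fence_cipher_4 plain_text (fence_cipher_4 plain_text)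

-- ===== LEMMAS AND PROOFS =====

-- every 4th element of a list, starting at its head
def stride4 {α : Type} : List α → List α
  | [] => []
  | [a] => [a]
  | [a, _] => [a]
  | [a, _, _] => [a]
  | a :: _ :: _ :: _ :: t => a :: stride4 t

theorem stride4_cons {α : Type} (x : α) (l : List α) :
    stride4 (x :: l) = x :: stride4 (l.drop 3) := by
  match l with
  | [] => simp [stride4]
  | [u] => simp [stride4]
  | [u, v] => simp [stride4]
  | u :: v :: w :: r => simp [stride4]

-- the filterMap produced by slice? with step 4 computes stride4
theorem filt_stride4 {α : Type} : ∀ m : List α,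
    List.filterMap (fun k => m[4 * k]?) (List.range ((m.length + 3) / 4)) = stride4 m
  | [] => by simp [stride4]
  | [a] => by simp [stride4, List.range_succ]
  | [a, b] => by simp [stride4, List.range_succ]
  | [a, b, c] => by simp [stride4, List.range_succ]
  | a :: b :: c :: d :: t => by
    have ih := filt_stride4 t
    have hq : ((a :: b :: c :: d :: t).length + 3) / 4 = (t.length + 3) / 4 + 1 := by
      simp only [List.length_cons]; omega
    rw [hq, List.range_succ_eq_map]
    simp only [List.filterMap_cons, List.filterMap_map, Nat.mul_zero,
      List.getElem?_cons_zero, Function.comp_def, Nat.succ_eq_add_one]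
    have hfun : (fun k => (a :: b :: c :: d :: t)[4 * (k + 1)]?) =
        (fun k => t[4 * k]?) := by
      funext k
      have h4 : 4 * (k + 1) = 4 * k + 1 + 1 + 1 + 1 := by omega
      rw [h4]
      simp [List.getElem?_cons_succ]
    rw [hfun, ih, stride4]

-- slice? with start r ∈ [0,3], no stop, step 4 computes stride4 of the r-drop
theorem sliceB {α : Type} (l : List α) (r : Nat) (hr : r ≤ 3) :
    (PySem.List.slice? l (some (r : Int)) none 4).getD [] = stride4 (l.drop r) := by
  simp only [PySem.List.slice?, PySem.List.sliceIndices]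
  rw [if_neg (by norm_num : ¬ ((4 : Int) = 0))]
  simp only [if_neg (by norm_num : ¬ ((4 : Int) < 0)),
    if_neg (by omega : ¬ ((r : Int) < 0)), if_pos (by norm_num : (0 : Int) < 4)]
  by_cases hn : l.length ≤ r
  · have hdrop : l.drop r = [] := List.drop_eq_nil_of_le hn
    have hmin : min (r : Int) (l.length : Int) = (l.length : Int) := by
      apply min_eq_right; exact_mod_cast hn
    rw [hmin, hdrop, if_neg (lt_irrefl _)]
    simp [stride4]
  · push_neg at hn
    have hmin : min (r : Int) (l.length : Int) = (r : Int) := by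
      apply min_eq_left; exact_mod_cast le_of_lt hn
    rw [hmin, if_pos (by exact_mod_cast hn)]
    have hcount : (((l.length : Int) - r + 4 - 1) / 4).toNat = ((l.drop r).length + 3) / 4 := by
      rw [List.length_drop]; omega
    rw [hcount]
    have hfun : (fun k : Nat => l[((r : Int) + 4 * (k : Int)).toNat]?) =
        (fun k : Nat => (l.drop r)[4 * k]?) := by
      funext k
      rw [List.getElem?_drop]
      have hidx : ((r : Int) + 4 * (k : Int)).toNat = r + 4 * k := by omega
      rw [hidx]
    rw [hfun, filt_stride4]
    rfl

-- fmod by 4 is emod by 4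
theorem mod4_emod (i : Int) : PySem.Int.mod i 4 = i % 4 := by
  simp [PySem.Int.mod, Int.fmod_eq_emod]

theorem step0 (l1 l2 l3 l4 : List Char) (i : Int) (c : Char) (h : i % 4 = 0) :
    fenceStep (l1, l2, l3, l4) (i, c) = (l1 ++ [c], l2, l3, l4) := by
  simp only [fenceStep, mod4_emod]
  rw [if_pos h]

theorem step1 (l1 l2 l3 l4 : List Char) (i : Int) (c : Char) (h : i % 4 = 1) :
    fenceStep (l1, l2, l3, l4) (i, c) = (l1, l2 ++ [c], l3, l4) := by
  simp only [fenceStep, mod4_emod]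
  rw [if_neg (by omega), if_pos h]

theorem step2 (l1 l2 l3 l4 : List Char) (i : Int) (c : Char) (h : i % 4 = 2) :
    fenceStep (l1, l2, l3, l4) (i, c) = (l1, l2, l3 ++ [c], l4) := by
  simp only [fenceStep, mod4_emod]
  rw [if_neg (by omega), if_neg (by omega), if_pos h]

theorem step3 (l1 l2 l3 l4 : List Char) (i : Int) (c : Char) (h : i % 4 = 3) :
    fenceStep (l1, l2, l3, l4) (i, c) = (l1, l2, l3, l4 ++ [c]) := by
  simp only [fenceStep, mod4_emod]
  rw [if_neg (by omega), if_neg (by omega), if_neg (by omega)]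

-- the A-side fold, from any index i ≡ 0 (mod 4), appends the four strides
theorem foldA : ∀ (l : List Char) (i : Int) (a1 a2 a3 a4 : List Char), i % 4 = 0 →
    (PySem.List.enumerate l i).foldl fenceStep (a1, a2, a3, a4) =
      (a1 ++ stride4 l, a2 ++ stride4 (l.drop 1), a3 ++ stride4 (l.drop 2), a4 ++ stride4 (l.drop 3))
  | [], i, a1, a2, a3, a4, hi => by simp [PySem.List.enumerate, stride4]
  | [a], i, a1, a2, a3, a4, hi => by
    simp only [PySem.List.enumerate, List.foldl]
    rw [step0 _ _ _ _ i _ hi]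
    simp [stride4]
  | [a, b], i, a1, a2, a3, a4, hi => by
    simp only [PySem.List.enumerate, List.foldl]
    rw [step0 _ _ _ _ i _ hi, step1 _ _ _ _ (i + 1) _ (by omega)]
    simp [stride4]
  | [a, b, c], i, a1, a2, a3, a4, hi => by
    simp only [PySem.List.enumerate, List.foldl]
    rw [step0 _ _ _ _ i _ hi, step1 _ _ _ _ (i + 1) _ (by omega), step2 _ _ _ _ (i + 1 + 1) _ (by omega)]
    simp [stride4]
  | a :: b :: c :: d :: t, i, a1, a2, a3, a4, hi => by
    have ih := foldA t (i + 4) (a1 ++ [a]) (a2 ++ [b]) (a3 ++ [c]) (a4 ++ [d]) (by omega)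
    simp only [PySem.List.enumerate, List.foldl]
    rw [step0 _ _ _ _ i _ hi, step1 _ _ _ _ (i + 1) _ (by omega),
        step2 _ _ _ _ (i + 1 + 1) _ (by omega), step3 _ _ _ _ (i + 1 + 1 + 1) _ (by omega)]
    have h4 : i + 1 + 1 + 1 + 1 = i + 4 := by omega
    rw [h4, ih]
    simp [stride4_cons]

-- ===== VERDICT (by name: the statement is the Claim_ definition above) =====
theorem fence_cipher_4_spec : Claim_equal_fence_cipher_4 := by
  intro plain_text _
  unfold Spec_fence_cipher_4 fence_cipher_4 fence_cipher_4_alt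
  have hA := foldA (PySem.Chars.join [] (PySem.Chars.split₀ plain_text.toList)) 0 [] [] [] [] (by decide)
  have s0 := sliceB (PySem.Chars.join [] (PySem.Chars.split₀ plain_text.toList)) 0 (by omega)
  have s1 := sliceB (PySem.Chars.join [] (PySem.Chars.split₀ plain_text.toList)) 1 (by omega)
  have s2 := sliceB (PySem.Chars.join [] (PySem.Chars.split₀ plain_text.toList)) 2 (by omega)
  have s3 := sliceB (PySem.Chars.join [] (PySem.Chars.split₀ plain_text.toList)) 3 (by omega)
  norm_num at s0 s1 s2 s3
  simp only [hA, s0, s1, s2, s3]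
  simp [List.drop_one]
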